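-- pv_equiv track=rewrite | github.com/wilmarberrio-bot/nivelacion-pro | normalization.py | normalize_address_key
-- ===== SOURCE A (Python) =====
-- def normalize_address_key(addr: str) -> str:
--     """
--     Normaliza address para usarlo como "clave edificio".
--     No es perfecto, pero reduce variabilidad.
--     """
--     if not addr:
--         return ""
--     a = addr.strip().upper()
--     for ch in [",", ".", "#", "-", "_"]:
--         a = a.replace(ch, " ")
--     a = " ".join(a.split())
--     return a[:80]
-- ===== SOURCE B (Python) =====
-- def normalize_address_key(addr: str) -> str:
--     if not addr:
--         return ""
--     words = []
--     buf = []
--     for ch in addr.strip().upper():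
--         if ch.isspace() or ch in ",.#-_":
--             if buf:
--                 words.append("".join(buf))
--                 buf = []
--         else:
--             buf.append(ch)
--     if buf:
--         words.append("".join(buf))
--     return " ".join(words)[:80]
-- ===== Notes on version B (the rewrite author's own statement) =====
-- stated objective: alternative
-- what changed: B replaces A's seven passes over the string (strip/upper, five replace passes, split, join) by one character-by-character scan that flushes a word buffer at whitespace or separator characters and joins the collected words.
import Mathlib
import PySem

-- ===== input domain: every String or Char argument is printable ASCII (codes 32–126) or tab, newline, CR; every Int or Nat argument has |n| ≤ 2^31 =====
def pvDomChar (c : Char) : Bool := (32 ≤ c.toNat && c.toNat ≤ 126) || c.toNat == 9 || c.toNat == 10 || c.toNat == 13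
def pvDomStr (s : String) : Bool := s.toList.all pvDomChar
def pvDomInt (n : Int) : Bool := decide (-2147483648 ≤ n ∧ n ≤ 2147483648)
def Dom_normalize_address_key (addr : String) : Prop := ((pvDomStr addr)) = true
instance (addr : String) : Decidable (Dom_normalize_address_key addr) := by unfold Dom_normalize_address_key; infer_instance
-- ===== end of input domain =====

-- B: one char-by-char scan with a word buffer instead of A's strip/upper + five replace passes + split/join (objective: alternative decomposition, same O(n) cost).

-- ===== PORT A =====
def normalize_address_key (addr : String) : String :=
  if addr = "" then ""
  else
    -- a = addr.strip().upper()
    let a0 := PySem.Chars.upper (PySem.Chars.strip addr.toList)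
    -- for ch in [",", ".", "#", "-", "_"]: a = a.replace(ch, " ")
    let a1 := [',', '.', '#', '-', '_'].foldl
      (fun s ch => PySem.Chars.replace s [ch] [' ']) a0
    -- a = " ".join(a.split())
    let a2 := PySem.Chars.join [' '] (PySem.Chars.split₀ a1)
    -- return a[:80]
    String.ofList (PySem.List.slice a2 none (some 80))

-- ===== PORT B =====
-- boundary test: ch.isspace() or ch in ",.#-_"
def pvIsBoundary (ch : Char) : Bool :=
  PySem.Chars.isspace ch || (ch == ',' || ch == '.' || ch == '#' || ch == '-' || ch == '_')

-- loop body: flush the buffer into the word list at a boundary, else extend the buffer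
def pvStep (st : List (List Char) × List Char) (ch : Char) : List (List Char) × List Char :=
  if pvIsBoundary ch then
    (if st.2.isEmpty then st.1 else st.1 ++ [st.2], [])
  else
    (st.1, st.2 ++ [ch])

def normalize_address_key_alt (addr : String) : String :=
  if addr = "" then ""
  else
    let s := PySem.Chars.upper (PySem.Chars.strip addr.toList)
    let st := s.foldl pvStep ([], [])
    -- final flush of the buffer
    let words := if st.2.isEmpty then st.1 else st.1 ++ [st.2]
    -- return " ".join(words)[:80]
    String.ofList ((PySem.Chars.join [' '] words).take 80)

-- ===== PRECONDITION & SPEC =====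
def Spec_normalize_address_key (addr : String) (out : String) : Prop := out = normalize_address_key_alt addr
instance (addr : String) (out : String) : Decidable (Spec_normalize_address_key addr out) := by unfold Spec_normalize_address_key; infer_instance

-- ===== CLAIM (what is proved, stated in full; the proofs are below) =====
def Claim_equal_normalize_address_key : Prop := ∀ (addr : String), Dom_normalize_address_key addr → Spec_normalize_address_key addr (normalize_address_key addr)

-- ===== LEMMAS AND PROOFS =====

-- the combined effect of A's five single-char replacements
def pvRepl (c : Char) : Char :=
  if c == ',' || c == '.' || c == '#' || c == '-' || c == '_' then ' ' else c

theorem pv_replace_go_single (c d : Char) :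
    ∀ (l : List Char) (fuel : Nat) (acc : List Char), l.length ≤ fuel →
      PySem.Chars.replace.go [c] [d] fuel l acc
        = acc.reverse ++ l.map (fun x => if x == c then d else x) := by
  intro l
  induction l with
  | nil =>
    intro fuel acc _
    cases fuel <;> simp [PySem.Chars.replace.go]
  | cons h t ih =>
    intro fuel acc hle
    cases fuel with
    | zero => simp at hle
    | succ f =>
      have ht : t.length ≤ f := by simpa using hle
      by_cases hc : h = c
      · subst hc
        simp [PySem.Chars.replace.go, List.isPrefixOf, ih f (d :: acc) ht]
      · have : ([c].isPrefixOf (h :: t)) = false := by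
          simp [List.isPrefixOf]; exact fun e => (hc e.symm).elim
        rw [PySem.Chars.replace.go, if_neg (by simp [this]), ih f (h :: acc) ht]
        simp [hc]

theorem pv_replace_single (l : List Char) (c d : Char) :
    PySem.Chars.replace l [c] [d] = l.map (fun x => if x == c then d else x) := by
  simpa [PySem.Chars.replace] using pv_replace_go_single c d l l.length [] le_rfl

theorem pv_chain (a : List Char) :
    [',', '.', '#', '-', '_'].foldl (fun s ch => PySem.Chars.replace s [ch] [' ']) a
      = a.map pvRepl := by
  simp only [List.foldl, pv_replace_single, List.map_map]
  apply List.map_congr_left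
  intro x _
  simp only [Function.comp, pvRepl]
  by_cases h1 : x = ',' <;> by_cases h2 : x = '.' <;> by_cases h3 : x = '#' <;>
    by_cases h4 : x = '-' <;> by_cases h5 : x = '_' <;> simp_all <;> decide

theorem pv_boundary_repl_space {c : Char} (h : pvIsBoundary c = true) :
    PySem.Chars.isspace (pvRepl c) = true := by
  unfold pvRepl
  by_cases hs : (c == ',' || c == '.' || c == '#' || c == '-' || c == '_') = true
  · rw [if_pos hs]; decide
  · rw [if_neg hs]
    have hs' : (c == ',' || c == '.' || c == '#' || c == '-' || c == '_') = false := by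
      simpa using hs
    simpa [pvIsBoundary, hs'] using h

theorem pv_nonboundary {c : Char} (h : pvIsBoundary c = false) :
    pvRepl c = c ∧ PySem.Chars.isspace c = false := by
  simp only [pvIsBoundary, Bool.or_eq_false_iff] at h
  refine ⟨?_, h.1⟩
  unfold pvRepl
  simp [h.2]

theorem pv_scan_eq :
    ∀ (cs : List Char) (ws : List (List Char)) (buf : List Char),
      PySem.Chars.split₀.go (cs.map pvRepl) buf.reverse ws.reverse
        = (if (cs.foldl pvStep (ws, buf)).2.isEmpty then (cs.foldl pvStep (ws, buf)).1
           else (cs.foldl pvStep (ws, buf)).1 ++ [(cs.foldl pvStep (ws, buf)).2]) := by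
  intro cs
  induction cs with
  | nil =>
    intro ws buf
    by_cases hb : buf.isEmpty <;>
      simp [PySem.Chars.split₀.go, hb, List.isEmpty_iff] at * <;>
      simp [hb, List.reverse_cons]
  | cons c t ih =>
    intro ws buf
    by_cases hbd : pvIsBoundary c = true
    · have hsp := pv_boundary_repl_space hbd
      by_cases hb : buf.isEmpty
      · have hbe : buf = [] := by simpa [List.isEmpty_iff] using hb
        subst hbe
        simpa [PySem.Chars.split₀.go, hsp, pvStep, hbd] using ih ws []
      · have := ih (ws ++ [buf]) []
        simp only [List.reverse_append, List.reverse_cons, List.reverse_nil,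
          List.nil_append, List.singleton_append] at this
        simpa [PySem.Chars.split₀.go, hsp, hb, pvStep, hbd] using this
    · have hbf : pvIsBoundary c = false := by simpa using hbd
      obtain ⟨hrepl, hns⟩ := pv_nonboundary hbf
      have := ih ws (buf ++ [c])
      simp only [List.reverse_append, List.reverse_cons, List.reverse_nil,
        List.nil_append, List.singleton_append] at this
      simpa [PySem.Chars.split₀.go, hrepl, hns, pvStep, hbf] using this

-- ===== VERDICT (by name: the statement is the Claim_ definition above) =====
theorem normalize_address_key_spec : Claim_equal_normalize_address_key := by
  intro addr _
  unfold Spec_normalize_address_key normalize_address_key normalize_address_key_alt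
  by_cases he : addr = ""
  · simp [he]
  · simp only [he, if_false]
    rw [pv_chain]
    have h := pv_scan_eq (PySem.Chars.upper (PySem.Chars.strip addr.toList)) [] []
    simp only [List.reverse_nil] at h
    rw [PySem.Chars.split₀, h, PySem.List.slice_to _ (by norm_num)]
    rfl
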